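-- pv_equiv track=rewrite | github.com/theocapp/othello | backend/contradictions.py | _cluster_consensus_counters
-- ===== SOURCE A (Python) =====
-- from collections import Counter
--
-- def _cluster_consensus_counters(signatures: list[dict]) -> dict:
--     entity_counter: Counter[str] = Counter()
--     keyword_counter: Counter[str] = Counter()
--     anchor_counter: Counter[str] = Counter()
--     for signature in signatures:
--         entity_counter.update(signature.get("entities", set()))
--         keyword_counter.update(signature.get("keywords", set()))
--         anchor_counter.update(signature.get("anchors", set()))
--     return {
--         "entities": entity_counter,
--         "keywords": keyword_counter,
--         "anchors": anchor_counter,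
--     }
-- ===== SOURCE B (Python) =====
-- from collections import Counter
--
--
-- def _cluster_consensus_counters(signatures: list[dict]) -> dict:
--     def tally(key: str) -> Counter:
--         flat = [x for s in signatures for x in s.get(key, set())]
--         return Counter({x: flat.count(x) for x in dict.fromkeys(flat)})
--
--     return {
--         "entities": tally("entities"),
--         "keywords": tally("keywords"),
--         "anchors": tally("anchors"),
--     }
-- ===== Notes on version B (the rewrite author's own statement) =====
-- stated objective: alternative
-- what changed: Instead of incrementally updating three hash counters while looping over signatures, B flattens each key's values into one list, deduplicates it to first occurrences, and computes each distinct element's count by scanning the flattened list with list.count.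
import Mathlib
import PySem

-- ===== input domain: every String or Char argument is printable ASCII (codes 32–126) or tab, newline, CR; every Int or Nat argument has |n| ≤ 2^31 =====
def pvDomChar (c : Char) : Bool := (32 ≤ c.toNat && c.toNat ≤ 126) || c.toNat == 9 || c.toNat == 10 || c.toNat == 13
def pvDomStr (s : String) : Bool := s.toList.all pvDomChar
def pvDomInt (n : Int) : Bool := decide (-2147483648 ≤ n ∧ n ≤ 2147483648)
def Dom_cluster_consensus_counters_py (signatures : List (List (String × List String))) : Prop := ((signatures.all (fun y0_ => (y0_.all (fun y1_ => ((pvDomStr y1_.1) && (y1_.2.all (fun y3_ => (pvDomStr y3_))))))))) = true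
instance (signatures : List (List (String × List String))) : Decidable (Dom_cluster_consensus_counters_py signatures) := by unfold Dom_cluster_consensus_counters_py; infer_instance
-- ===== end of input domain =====

-- B drops the incremental hash counters: per key it flattens all values, deduplicates to
-- first occurrences, and computes each count by scanning the flat list; objective: alternative.
-- ===== PORT A =====
-- Counter.update(xs): for x in xs, c[x] += 1 (new keys appended)
def pvCounterUpdate (c : PySem.Dict String Int) (xs : List String) : PySem.Dict String Int :=
  xs.foldl (fun d x => d.modify x 0 (· + 1)) c

def cluster_consensus_counters_py (signatures : List (List (String × List String))) : List (String × List (String × Int)) :=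
  let st := signatures.foldl
    (fun (st : PySem.Dict String Int × PySem.Dict String Int × PySem.Dict String Int) signature =>
      (pvCounterUpdate st.1 (PySem.Dict.getD (PySem.Dict.mk signature) "entities" []),
       pvCounterUpdate st.2.1 (PySem.Dict.getD (PySem.Dict.mk signature) "keywords" []),
       pvCounterUpdate st.2.2 (PySem.Dict.getD (PySem.Dict.mk signature) "anchors" [])))
    (PySem.Dict.empty, PySem.Dict.empty, PySem.Dict.empty)
  [("entities", st.1.items), ("keywords", st.2.1.items), ("anchors", st.2.2.items)]

-- ===== PORT B =====
-- flat = [x for s in signatures for x in s.get(key, set())]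
-- Counter({x: flat.count(x) for x in dict.fromkeys(flat)})
def pvTally (signatures : List (List (String × List String))) (key : String) : List (String × Int) :=
  let flat := signatures.flatMap (fun s => PySem.Dict.getD (PySem.Dict.mk s) key [])
  (PySem.List.dedup flat).map (fun x => (x, (flat.count x : Int)))

def cluster_consensus_counters_py_alt (signatures : List (List (String × List String))) : List (String × List (String × Int)) :=
  [("entities", pvTally signatures "entities"),
   ("keywords", pvTally signatures "keywords"),
   ("anchors", pvTally signatures "anchors")]

-- ===== PRECONDITION & SPEC =====
def Spec_cluster_consensus_counters_py (signatures : List (List (String × List String))) (out : List (String × List (String × Int))) : Prop := out = cluster_consensus_counters_py_alt signatures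
instance (signatures : List (List (String × List String))) (out : List (String × List (String × Int))) : Decidable (Spec_cluster_consensus_counters_py signatures out) := by unfold Spec_cluster_consensus_counters_py; infer_instance

-- ===== CLAIM =====
def Claim_equal_cluster_consensus_counters_py : Prop := ∀ (signatures : List (List (String × List String))), Dom_cluster_consensus_counters_py signatures → Spec_cluster_consensus_counters_py signatures (cluster_consensus_counters_py signatures)

-- ===== LEMMAS AND PROOFS =====
-- A's per-key accumulation over the signature list, rendered as the items of one Counter of
-- the flattened stream, equals B's dedup-then-count-by-scan list.
theorem pvTally_eq (signatures : List (List (String × List String))) (key : String) :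
    (signatures.foldl (fun d s => pvCounterUpdate d (PySem.Dict.getD (PySem.Dict.mk s) key [])) PySem.Dict.empty).items
      = pvTally signatures key := by
  simp only [pvTally, pvCounterUpdate, ← List.foldl_flatMap, ← PySem.Dict.counter_eq_foldl,
    PySem.Dict.items_counter, PySem.List.dedup_eq_ofList]

-- ===== VERDICT =====
theorem cluster_consensus_counters_py_spec : Claim_equal_cluster_consensus_counters_py := by
  intro signatures _
  unfold Spec_cluster_consensus_counters_py cluster_consensus_counters_py cluster_consensus_counters_py_alt
  rw [PySem.List.foldl_prod_mk
        (f := fun d s => pvCounterUpdate d (PySem.Dict.getD (PySem.Dict.mk s) "entities" []))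
        (g := fun (p : PySem.Dict String Int × PySem.Dict String Int) s =>
          (pvCounterUpdate p.1 (PySem.Dict.getD (PySem.Dict.mk s) "keywords" []),
           pvCounterUpdate p.2 (PySem.Dict.getD (PySem.Dict.mk s) "anchors" []))),
      PySem.List.foldl_prod_mk
        (f := fun d s => pvCounterUpdate d (PySem.Dict.getD (PySem.Dict.mk s) "keywords" []))
        (g := fun d s => pvCounterUpdate d (PySem.Dict.getD (PySem.Dict.mk s) "anchors" []))]
  simp [pvTally_eq]
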